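-- pv_equiv track=rewrite | github.com/OlaProeis/Glitchframe | pipeline/title_overlay.py | normalize_title_position
-- ===== SOURCE A (Python) =====
-- TITLE_POSITIONS: tuple[str, ...] = (
--     "top-left",
--     "top-center",
--     "top-right",
--     "middle-left",
--     "center",
--     "middle-right",
--     "bottom-left",
--     "bottom-center",
--     "bottom-right",
-- )
--
-- _POSITION_ALIASES: dict[str, tuple[str, ...]] = {
--     "top-left": ("top-left", "topleft", "tl"),
--     "top-center": ("top-center", "top", "topcenter", "tc"),
--     "top-right": ("top-right", "topright", "tr"),
--     "middle-left": ("middle-left", "left", "middleleft", "ml"),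
--     "center": ("center", "centre", "middle", "mc"),
--     "middle-right": ("middle-right", "right", "middleright", "mr"),
--     "bottom-left": ("bottom-left", "bottomleft", "bl"),
--     "bottom-center": ("bottom-center", "bottom", "bottomcenter", "bc"),
--     "bottom-right": ("bottom-right", "bottomright", "br"),
-- }
--
-- def normalize_title_position(label: str) -> str:
--     """Map free-form UI labels to one of :data:`TITLE_POSITIONS`."""
--     key = label.strip().lower().replace(" ", "-")
--     for canonical, aliases in _POSITION_ALIASES.items():
--         if key == canonical or key in aliases:
--             return canonical
--     raise ValueError(
--         f"Unknown title position: {label!r}; expected one of {TITLE_POSITIONS}"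
--     )
-- ===== SOURCE B (Python) =====
-- TITLE_POSITIONS: tuple[str, ...] = (
--     "top-left",
--     "top-center",
--     "top-right",
--     "middle-left",
--     "center",
--     "middle-right",
--     "bottom-left",
--     "bottom-center",
--     "bottom-right",
-- )
--
-- _POSITION_ALIASES: dict[str, tuple[str, ...]] = {
--     "top-left": ("top-left", "topleft", "tl"),
--     "top-center": ("top-center", "top", "topcenter", "tc"),
--     "top-right": ("top-right", "topright", "tr"),
--     "middle-left": ("middle-left", "left", "middleleft", "ml"),
--     "center": ("center", "centre", "middle", "mc"),
--     "middle-right": ("middle-right", "right", "middleright", "mr"),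
--     "bottom-left": ("bottom-left", "bottomleft", "bl"),
--     "bottom-center": ("bottom-center", "bottom", "bottomcenter", "bc"),
--     "bottom-right": ("bottom-right", "bottomright", "br"),
-- }
--
-- # Flat reverse index: alias -> canonical (each canonical is among its own aliases).
-- _ALIAS_TO_CANONICAL: dict[str, str] = {
--     alias: canonical
--     for canonical, aliases in _POSITION_ALIASES.items()
--     for alias in aliases
-- }
--
-- def normalize_title_position(label: str) -> str:
--     """Map free-form UI labels to one of :data:`TITLE_POSITIONS`."""
--     key = label.strip().lower().replace(" ", "-")
--     canonical = _ALIAS_TO_CANONICAL.get(key)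
--     if canonical is None:
--         raise ValueError(
--             f"Unknown title position: {label!r}; expected one of {TITLE_POSITIONS}"
--         )
--     return canonical
-- ===== Notes on version B (the rewrite author's own statement) =====
-- stated objective: idiomatic
-- what changed: Replaces A's per-entry scan over the alias table with its two-condition branch by a single lookup in a precomputed flat alias-to-canonical reverse index dict.
import Mathlib
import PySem

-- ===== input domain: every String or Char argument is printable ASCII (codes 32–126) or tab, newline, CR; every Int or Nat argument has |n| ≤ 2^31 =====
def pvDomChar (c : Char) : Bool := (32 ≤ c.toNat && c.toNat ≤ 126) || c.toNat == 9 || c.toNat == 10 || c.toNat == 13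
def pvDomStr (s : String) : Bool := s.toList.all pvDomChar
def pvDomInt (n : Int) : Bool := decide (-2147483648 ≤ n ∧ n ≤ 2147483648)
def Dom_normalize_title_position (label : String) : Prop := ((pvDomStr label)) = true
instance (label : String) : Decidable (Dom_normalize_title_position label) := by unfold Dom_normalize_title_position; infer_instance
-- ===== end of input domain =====

-- B replaces A's per-entry scan-and-branch with a single lookup in a precomputed flat
-- alias->canonical index (idiomatic/data-structure change); A raises ValueError on
-- unknown labels, which Pre_ excludes. Equivalence is about the return value.

-- ===== PORT A =====
def pvEntriesA : List (String × List String) :=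
  [ ("top-left", ["top-left", "topleft", "tl"]),
    ("top-center", ["top-center", "top", "topcenter", "tc"]),
    ("top-right", ["top-right", "topright", "tr"]),
    ("middle-left", ["middle-left", "left", "middleleft", "ml"]),
    ("center", ["center", "centre", "middle", "mc"]),
    ("middle-right", ["middle-right", "right", "middleright", "mr"]),
    ("bottom-left", ["bottom-left", "bottomleft", "bl"]),
    ("bottom-center", ["bottom-center", "bottom", "bottomcenter", "bc"]),
    ("bottom-right", ["bottom-right", "bottomright", "br"]) ]

-- the for-loop over _POSITION_ALIASES.items(); "" stands for the ValueError (outside Pre_)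
def pvScanA (key : String) : List (String × List String) → String
  | [] => ""
  | (canonical, aliases) :: rest =>
      if key == canonical || aliases.contains key then canonical else pvScanA key rest

def normalize_title_position (label : String) : String :=
  pvScanA (PySem.Str.replace (PySem.Str.lower (PySem.Str.strip label)) " " "-") pvEntriesA

-- ===== PORT B =====
-- the precomputed flat reverse-lookup dict _ALIAS_TO_CANONICAL
def pvAliasToCanonical : PySem.Dict String String :=
  PySem.Dict.ofList
    [ ("top-left", "top-left"), ("topleft", "top-left"), ("tl", "top-left"),
      ("top-center", "top-center"), ("top", "top-center"), ("topcenter", "top-center"), ("tc", "top-center"),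
      ("top-right", "top-right"), ("topright", "top-right"), ("tr", "top-right"),
      ("middle-left", "middle-left"), ("left", "middle-left"), ("middleleft", "middle-left"), ("ml", "middle-left"),
      ("center", "center"), ("centre", "center"), ("middle", "center"), ("mc", "center"),
      ("middle-right", "middle-right"), ("right", "middle-right"), ("middleright", "middle-right"), ("mr", "middle-right"),
      ("bottom-left", "bottom-left"), ("bottomleft", "bottom-left"), ("bl", "bottom-left"),
      ("bottom-center", "bottom-center"), ("bottom", "bottom-center"), ("bottomcenter", "bottom-center"), ("bc", "bottom-center"),
      ("bottom-right", "bottom-right"), ("bottomright", "bottom-right"), ("br", "bottom-right") ]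

-- single O(1)-style table lookup; "" stands for the ValueError branch (outside Pre_)
def pvLookupB (key : String) : String :=
  match pvAliasToCanonical.get? key with
  | some canonical => canonical
  | none => ""

def normalize_title_position_alt (label : String) : String :=
  pvLookupB (PySem.Str.replace (PySem.Str.lower (PySem.Str.strip label)) " " "-")

-- ===== PRECONDITION & SPEC =====
-- Pre_ admits exactly the labels whose normalized key is a known alias; on all
-- other labels the Python A raises ValueError.
def pvKnownKeys : List String :=
  [ "top-left", "topleft", "tl",
    "top-center", "top", "topcenter", "tc",
    "top-right", "topright", "tr",
    "middle-left", "left", "middleleft", "ml",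
    "center", "centre", "middle", "mc",
    "middle-right", "right", "middleright", "mr",
    "bottom-left", "bottomleft", "bl",
    "bottom-center", "bottom", "bottomcenter", "bc",
    "bottom-right", "bottomright", "br" ]

def Pre_normalize_title_position (label : String) : Prop :=
  (PySem.Str.replace (PySem.Str.lower (PySem.Str.strip label)) " " "-") ∈ pvKnownKeys
instance (label : String) : Decidable (Pre_normalize_title_position label) := by
  unfold Pre_normalize_title_position; infer_instance

def pvWitness_normalize_title_position : String := " Top Left "

def Spec_normalize_title_position (label : String) (out : String) : Prop := out = normalize_title_position_alt label
instance (label : String) (out : String) : Decidable (Spec_normalize_title_position label out) := by unfold Spec_normalize_title_position; infer_instance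

-- ===== CLAIM (what is proved, stated in full; the proofs are below) =====
def Claim_equal_normalize_title_position : Prop := ∀ (label : String), Dom_normalize_title_position label → Pre_normalize_title_position label → Spec_normalize_title_position label (normalize_title_position label)

-- ===== LEMMAS AND PROOFS =====
-- for every known key, A's scan and B's dict lookup agree (finite check)
set_option maxHeartbeats 4000000 in
theorem pvCoreAgree : ∀ k ∈ pvKnownKeys, pvScanA k pvEntriesA = pvLookupB k := by decide

-- ===== VERDICT (by name: the statement is the Claim_ definition above) =====
set_option maxHeartbeats 4000000 in
theorem normalize_title_position_spec : Claim_equal_normalize_title_position := by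
  intro label _ hpre
  exact pvCoreAgree _ hpre
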